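-- pv_equiv track=rewrite | github.com/Hijtec/breach_rides_elevator | stage/bre_postprocess.py | recalculate_cols
-- ===== SOURCE A (Python) =====
-- def recalculate_cols(suppressed):
--     """Recalculates columns after the potential suppression of first row.
--
--     Args:
--         suppressed:                     List of unique rows
--
--     Returns:
--         cols_ordered_suppressed:        List of ordered unique columns
--     """
--     cols_ordered_suppressed = []
--     ncols, col = 0, []
--
--     for i in suppressed:
--         if len(i) > ncols:
--             ncols = len(i)
--
--     for i in range(ncols):
--         col = []
--         for item in suppressed:
--             if len(item)-1 >= i:
--                 col.append(item[i])
--         cols_ordered_suppressed.append(col)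
--
--     return cols_ordered_suppressed
-- ===== SOURCE B (Python) =====
-- def recalculate_cols(suppressed):
--     """Transpose jagged rows into ordered columns by repeatedly peeling off
--     the first element of every non-empty row (no max-width pass, no indexing)."""
--     cols = []
--     rows = list(suppressed)
--     while any(rows):
--         cols.append([r[0] for r in rows if r])
--         rows = [r[1:] for r in rows]
--     return cols
-- ===== Notes on version B (the rewrite author's own statement) =====
-- stated objective: alternative
-- what changed: Replaces A's max-width computation plus per-column index scans (re-testing every row's length for each column) with a single transpose-style loop that repeatedly peels the head of every non-empty row, slicing the rows down until all are exhausted.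
import Mathlib
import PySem

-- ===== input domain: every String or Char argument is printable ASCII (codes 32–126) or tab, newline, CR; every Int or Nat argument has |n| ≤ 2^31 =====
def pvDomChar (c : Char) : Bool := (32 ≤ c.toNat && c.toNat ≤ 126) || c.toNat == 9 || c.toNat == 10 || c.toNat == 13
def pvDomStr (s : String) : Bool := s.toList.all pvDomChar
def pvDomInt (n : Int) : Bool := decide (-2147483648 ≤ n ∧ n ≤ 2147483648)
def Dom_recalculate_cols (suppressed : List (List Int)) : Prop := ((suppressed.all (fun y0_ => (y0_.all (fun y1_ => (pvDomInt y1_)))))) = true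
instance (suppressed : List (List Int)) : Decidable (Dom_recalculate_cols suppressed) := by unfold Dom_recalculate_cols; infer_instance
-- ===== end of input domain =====

-- B replaces A's max-width pass + per-column row scans by a head-peeling transpose loop (alternative algorithm, same cost).

-- ===== PORT A =====
-- literal transliteration of A: the first loop computes ncols (the max row length),
-- the second loop builds each column i by scanning all rows; item[i] is guarded by
-- len(item)-1 >= i, so pyGet? is some there and the .getD 0 default is never used.
def recalculate_cols (suppressed : List (List Int)) : List (List Int) :=
  (PySem.List.pyRange 0
      (suppressed.foldl (fun n i => if (i.length : Int) > n then (i.length : Int) else n) 0) 1).foldl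
    (fun acc i =>
      acc ++ [suppressed.foldl (fun col item =>
        if (item.length : Int) - 1 ≥ i then col ++ [(PySem.List.pyGet? item i).getD 0] else col) []])
    []

-- ===== PORT B =====
-- termination helpers for the peeling loop (cited in decreasing_by)
theorem pvSumLen_drop_le (rows : List (List Int)) :
    ((rows.map (List.drop 1)).map List.length).sum ≤ (rows.map List.length).sum := by
  induction rows with
  | nil => simp
  | cons r rs ih =>
    simp only [List.map_cons, List.sum_cons, List.length_drop]
    omega

theorem pvSumLen_drop_lt (rows : List (List Int)) (h : rows.any (fun r => !r.isEmpty) = true) :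
    ((rows.map (List.drop 1)).map List.length).sum < (rows.map List.length).sum := by
  induction rows with
  | nil => simp at h
  | cons r rs ih =>
    simp only [List.any_cons, Bool.or_eq_true] at h
    simp only [List.map_cons, List.sum_cons, List.length_drop]
    rcases h with h | h
    · have hr : r.length ≠ 0 := by
        simpa [List.isEmpty_iff, List.length_eq_zero_iff] using h
      have := pvSumLen_drop_le rs
      omega
    · have := ih h
      omega

-- port of B: while any(rows): cols.append([r[0] for r in rows if r]); rows = [r[1:] for r in rows]
def recalculate_cols_alt (suppressed : List (List Int)) : List (List Int) :=
  if h : suppressed.any (fun r => !r.isEmpty) then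
    suppressed.filterMap List.head? :: recalculate_cols_alt (suppressed.map (List.drop 1))
  else []
termination_by (suppressed.map List.length).sum
decreasing_by
  simpa [List.map_map, Function.comp_def, List.drop_one] using pvSumLen_drop_lt suppressed h

-- ===== PRECONDITION & SPEC =====
def Spec_recalculate_cols (suppressed : List (List Int)) (out : List (List Int)) : Prop := out = recalculate_cols_alt suppressed
instance (suppressed : List (List Int)) (out : List (List Int)) : Decidable (Spec_recalculate_cols suppressed out) := by unfold Spec_recalculate_cols; infer_instance

-- ===== CLAIM (what is proved, stated in full; the proofs are below) =====
def Claim_equal_recalculate_cols : Prop := ∀ (suppressed : List (List Int)), Dom_recalculate_cols suppressed → Spec_recalculate_cols suppressed (recalculate_cols suppressed)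

-- ===== LEMMAS AND PROOFS =====

-- common characterisation: the k-th column is the rows' k-th elements, in order
def pvCol (rows : List (List Int)) (k : Nat) : List Int := rows.filterMap (fun r => r[k]?)

-- the number of columns: maximum row length
def pvN (rows : List (List Int)) : Nat := rows.foldl (fun n r => max n r.length) 0

theorem pvN_foldl (rows : List (List Int)) (a : Nat) :
    rows.foldl (fun n r => max n r.length) a = max a (pvN rows) := by
  induction rows generalizing a with
  | nil => simp [pvN]
  | cons r rs ih =>
    rw [List.foldl_cons, ih]
    have h2 : pvN (r :: rs) = max (max 0 r.length) (pvN rs) := by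
      rw [pvN, List.foldl_cons]; exact ih _
    omega

theorem pvN_cons (r : List Int) (rs : List (List Int)) :
    pvN (r :: rs) = max r.length (pvN rs) := by
  rw [pvN, List.foldl_cons, pvN_foldl]
  omega

theorem pvN_eq_zero_iff (rows : List (List Int)) :
    pvN rows = 0 ↔ rows.any (fun r => !r.isEmpty) = false := by
  induction rows with
  | nil => simp [pvN]
  | cons r rs ih =>
    rw [pvN_cons, Nat.max_eq_zero_iff, ih]
    simp [List.isEmpty_iff, List.length_eq_zero_iff]

theorem pvN_drop (rows : List (List Int)) :
    pvN (rows.map (List.drop 1)) = pvN rows - 1 := by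
  induction rows with
  | nil => simp [pvN]
  | cons r rs ih =>
    rw [List.map_cons, pvN_cons, pvN_cons, ih, List.length_drop]
    omega

-- A's Int fold for ncols equals pvN
theorem pvA_ncols (rows : List (List Int)) (a : Nat) :
    rows.foldl (fun n i => if (i.length : Int) > n then (i.length : Int) else n) (a : Int)
      = ((rows.foldl (fun n r => max n r.length) a : Nat) : Int) := by
  induction rows generalizing a with
  | nil => simp
  | cons r rs ih =>
    simp only [List.foldl_cons]
    rcases Nat.lt_or_ge a r.length with h | h
    · have e : max a r.length = r.length := by omega
      rw [if_pos (by exact_mod_cast h), e]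
      exact ih r.length
    · have e : max a r.length = a := by omega
      rw [if_neg (by exact_mod_cast Nat.not_lt.mpr h), e]
      exact ih a

-- A's inner loop builds exactly pvCol
theorem pvA_col (rows : List (List Int)) (k : Nat) (acc : List Int) :
    rows.foldl (fun col item =>
      if (item.length : Int) - 1 ≥ (k : Int) then col ++ [(PySem.List.pyGet? item (k : Int)).getD 0] else col) acc
      = acc ++ pvCol rows k := by
  induction rows generalizing acc with
  | nil => simp [pvCol]
  | cons r rs ih =>
    rw [List.foldl_cons]
    by_cases h : k < r.length
    · rw [if_pos (by omega), ih, PySem.List.pyGet?_ofNat r k h]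
      simp [pvCol, List.getElem?_eq_getElem h]
    · rw [if_neg (by omega), ih]
      simp [pvCol, List.getElem?_eq_none (by omega : r.length ≤ k)]

theorem pvA_ncols0 (rows : List (List Int)) :
    rows.foldl (fun n i => if (i.length : Int) > n then (i.length : Int) else n) 0
      = ((pvN rows : Nat) : Int) := by
  simpa using pvA_ncols rows 0

-- A equals the column characterisation
theorem pvA_eq (rows : List (List Int)) :
    recalculate_cols rows = (List.range (pvN rows)).map (pvCol rows) := by
  unfold recalculate_cols
  rw [pvA_ncols0, PySem.List.pyRange_zero_natCast, PySem.List.foldl_append_singleton_eq_map]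
  simp only [List.map_map, List.nil_append]
  apply List.map_congr_left
  intro k _
  simpa using pvA_col rows k []

-- B equals the column characterisation (induction on the number of columns)
theorem pvB_eq (rows : List (List Int)) :
    recalculate_cols_alt rows = (List.range (pvN rows)).map (pvCol rows) := by
  generalize hn : pvN rows = n
  induction n generalizing rows with
  | zero =>
    conv_lhs => rw [recalculate_cols_alt]
    rw [dif_neg (by simp [(pvN_eq_zero_iff rows).mp hn])]
    simp
  | succ m ih =>
    have hany : rows.any (fun r => !r.isEmpty) = true := by
      by_contra h
      rw [Bool.not_eq_true, ← pvN_eq_zero_iff, hn] at h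
      omega
    conv_lhs => rw [recalculate_cols_alt]
    rw [dif_pos hany]
    have hdrop : pvN (rows.map (List.drop 1)) = m := by rw [pvN_drop, hn]; omega
    rw [ih _ hdrop, List.range_succ_eq_map, List.map_cons, List.map_map]
    congr 1
    · exact List.filterMap_congr (fun r _ => List.head?_eq_getElem?)
    · apply List.map_congr_left
      intro k _
      simp only [Function.comp, pvCol, List.filterMap_map]
      apply List.filterMap_congr
      intro r _
      simp

-- ===== VERDICT (by name: the statement is the Claim_ definition above) =====
theorem recalculate_cols_spec : Claim_equal_recalculate_cols := by
  intro suppressed _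
  unfold Spec_recalculate_cols
  rw [pvA_eq, pvB_eq]
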